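-- pv_equiv track=rewrite | github.com/Fabricio-Jose/Seguridad | lab2/lab2_addAQUI.py | insertar_cadena_cada_4
-- ===== SOURCE A (Python) =====
-- def insertar_cadena_cada_4(texto, cadena_a_insertar):
--     texto_con_cadena = ""
--     contador = 0
--
--     for caracter in texto:
--         if contador == 4:
--             texto_con_cadena += cadena_a_insertar
--             contador = 0
--         texto_con_cadena += caracter
--         contador += 1
--
--     # Asegurarse de que el texto tenga un número de caracteres múltiplo de 4
--     caracteres_faltantes = len(texto_con_cadena) % 4
--     if caracteres_faltantes > 0:
--         caracteres_a_rellenar = 4 - caracteres_faltantes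
--         texto_con_cadena += "X" * caracteres_a_rellenar
--
--     return texto_con_cadena
-- ===== SOURCE B (Python) =====
-- def insertar_cadena_cada_4(texto, cadena_a_insertar):
--     # chunk-and-join instead of the per-character counter scan
--     chunks = []
--     resto = texto
--     while resto:
--         chunks.append(resto[:4])
--         resto = resto[4:]
--     resultado = cadena_a_insertar.join(chunks)
--     faltantes = len(resultado) % 4
--     if faltantes > 0:
--         resultado += "X" * (4 - faltantes)
--     return resultado
-- ===== Notes on version B (the rewrite author's own statement) =====
-- stated objective: idiomatic
-- what changed: Replaces the per-character scan with a counter by slicing the text into 4-character chunks and joining them with the separator, then applying the same padding.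
import Mathlib
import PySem

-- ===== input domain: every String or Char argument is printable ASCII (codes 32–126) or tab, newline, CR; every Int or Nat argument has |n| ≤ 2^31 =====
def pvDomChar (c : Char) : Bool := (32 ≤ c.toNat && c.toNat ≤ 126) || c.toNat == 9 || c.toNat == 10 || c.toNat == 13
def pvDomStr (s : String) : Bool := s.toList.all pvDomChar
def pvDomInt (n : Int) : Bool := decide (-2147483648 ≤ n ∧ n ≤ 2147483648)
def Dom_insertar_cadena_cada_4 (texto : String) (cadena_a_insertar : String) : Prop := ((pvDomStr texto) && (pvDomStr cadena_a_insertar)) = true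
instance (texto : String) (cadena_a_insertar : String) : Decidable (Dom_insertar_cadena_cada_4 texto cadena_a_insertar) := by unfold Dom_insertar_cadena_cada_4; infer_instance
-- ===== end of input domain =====

-- B replaces A's per-character counter scan by chunk-into-4s then join (more idiomatic); padding step unchanged.

-- ===== PORT A =====
-- the for-loop of A: state (texto_con_cadena, contador), one step per character
def pvLoopA (sep : List Char) (acc : List Char) (contador : Int) : List Char → List Char
  | [] => acc
  | c :: rest =>
    if contador == 4 then
      -- contador==4: append sep, reset contador to 0, then append c and increment
      pvLoopA sep (acc ++ sep ++ [c]) 1 rest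
    else
      pvLoopA sep (acc ++ [c]) (contador + 1) rest

def insertar_cadena_cada_4 (texto : String) (cadena_a_insertar : String) : String :=
  let acc := pvLoopA cadena_a_insertar.toList [] 0 texto.toList
  -- len(...) % 4 on a nonnegative length: Nat % is exact here
  let caracteres_faltantes := acc.length % 4
  String.ofList (if caracteres_faltantes > 0 then acc ++ List.replicate (4 - caracteres_faltantes) 'X' else acc)

-- ===== PORT B =====
-- the while-loop of B: chunks.append(resto[:4]); resto = resto[4:]
def pvChunks4 (resto : List Char) : List (List Char) :=
  if h : resto = [] then []
  else
    PySem.List.slice resto none (some 4) :: pvChunks4 (PySem.List.slice resto (some 4) none)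
termination_by resto.length
decreasing_by
  rw [PySem.List.slice_from resto (by omega : (0:Int) ≤ 4)]
  have : resto.length ≠ 0 := fun h0 => h (List.eq_nil_of_length_eq_zero h0)
  simp
  omega

def insertar_cadena_cada_4_alt (texto : String) (cadena_a_insertar : String) : String :=
  let chunks := pvChunks4 texto.toList
  let resultado := PySem.Chars.join cadena_a_insertar.toList chunks
  let faltantes := resultado.length % 4
  String.ofList (if faltantes > 0 then resultado ++ List.replicate (4 - faltantes) 'X' else resultado)

-- ===== PRECONDITION & SPEC =====
def Spec_insertar_cadena_cada_4 (texto : String) (cadena_a_insertar : String) (out : String) : Prop := out = insertar_cadena_cada_4_alt texto cadena_a_insertar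
instance (texto : String) (cadena_a_insertar : String) (out : String) : Decidable (Spec_insertar_cadena_cada_4 texto cadena_a_insertar out) := by unfold Spec_insertar_cadena_cada_4; infer_instance

-- ===== CLAIM (what is proved, stated in full; the proofs are below) =====
def Claim_equal_insertar_cadena_cada_4 : Prop := ∀ (texto : String) (cadena_a_insertar : String), Dom_insertar_cadena_cada_4 texto cadena_a_insertar → Spec_insertar_cadena_cada_4 texto cadena_a_insertar (insertar_cadena_cada_4 texto cadena_a_insertar)

-- ===== LEMMAS AND PROOFS =====

lemma pvChunks4_nil : pvChunks4 [] = [] := by simp [pvChunks4]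

lemma pvChunks4_cons (c : Char) (l : List Char) :
    pvChunks4 (c :: l) = (c :: l).take 4 :: pvChunks4 ((c :: l).drop 4) := by
  conv_lhs => rw [pvChunks4]
  rw [PySem.List.slice_from _ (by omega : (0:Int) ≤ 4),
      PySem.List.slice_to _ (by omega : (0:Int) ≤ 4)]
  simp

lemma pvLoopA_eq (sep : List Char) :
    ∀ (n : Nat) (l : List Char), l.length ≤ n → ∀ acc,
      pvLoopA sep acc 0 l = acc ++ PySem.Chars.join sep (pvChunks4 l) := by
  intro n
  induction n with
  | zero =>
    intro l hl acc
    have : l = [] := List.eq_nil_of_length_eq_zero (by omega)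
    subst this
    simp [pvLoopA, pvChunks4_nil, PySem.Chars.join_nil]
  | succ n IH =>
    intro l hl acc
    match l with
    | [] => simp [pvLoopA, pvChunks4_nil, PySem.Chars.join_nil]
    | [a] => simp [pvLoopA, pvChunks4_cons, pvChunks4_nil, PySem.Chars.join_singleton]
    | [a, b] => simp [pvLoopA, pvChunks4_cons, pvChunks4_nil, PySem.Chars.join_singleton]
    | [a, b, c] => simp [pvLoopA, pvChunks4_cons, pvChunks4_nil, PySem.Chars.join_singleton]
    | [a, b, c, d] => simp [pvLoopA, pvChunks4_cons, pvChunks4_nil, PySem.Chars.join_singleton]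
    | a :: b :: c :: d :: e :: rest =>
      have hlen : (e :: rest).length ≤ n := by simp at hl ⊢; omega
      -- unfold the first four counter steps (contador 0,1,2,3) and the sep insertion at contador 4
      have h1 : pvLoopA sep acc 0 (a :: b :: c :: d :: e :: rest)
          = pvLoopA sep ((acc ++ [a, b, c, d] ++ sep) ++ [e]) 1 rest := by
        simp [pvLoopA]
      have h2 : pvLoopA sep (acc ++ [a, b, c, d] ++ sep) 0 (e :: rest)
          = pvLoopA sep ((acc ++ [a, b, c, d] ++ sep) ++ [e]) 1 rest := by
        simp [pvLoopA]
      have h3 := IH (e :: rest) hlen (acc ++ [a, b, c, d] ++ sep)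
      rw [h1, ← h2, h3]
      rw [pvChunks4_cons a (b :: c :: d :: e :: rest)]
      have hne : pvChunks4 (e :: rest) ≠ [] := by
        rw [pvChunks4_cons]; simp
      obtain ⟨x, xs, hx⟩ := List.exists_cons_of_ne_nil hne
      simp [hx, PySem.Chars.join_cons_cons]

-- ===== VERDICT (by name: the statement is the Claim_ definition above) =====
theorem insertar_cadena_cada_4_spec : Claim_equal_insertar_cadena_cada_4 := by
  intro texto cad _
  unfold Spec_insertar_cadena_cada_4 insertar_cadena_cada_4 insertar_cadena_cada_4_alt
  rw [pvLoopA_eq cad.toList texto.toList.length texto.toList (le_refl _) []]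
  simp
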